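-- pv_equiv track=rewrite | github.com/zcgu/Mobile-App-Development-CS407 | cs407assign4/helper.py | divide_data
-- ===== SOURCE A (Python) =====
-- def divide_data(data_time, threshold):
--     starts = []
--     starts.append(0)
--     ends = []
--
--     i = 0
--     while i < len(data_time):
--         if abs(data_time[i]) > threshold:
--             # for j in range(0, i):
--             #     if abs(data_time[i - j]) < threshold / 10:
--             #         ends.append(i - j)
--             #         break
--             # for j in range(0, len(data_time) - i):
--             #     if abs(data_time[i + j]) < threshold / 10:
--             #         starts.append(i + j)
--             #         i += j
--             #         break
--             ends.append(i)
--             for j in range(0, len(data_time) - i):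
--                 if abs(data_time[i + j]) < threshold:
--                     starts.append(i + j)
--                     i += j
--                     break
--         i += 1
--
--     ends.append(len(data_time))
--     return starts, ends
-- ===== SOURCE B (Python) =====
-- def divide_data(data_time, threshold):
--     n = len(data_time)
--     # suffix pass: nxt[i] = first index k >= i with abs(data_time[k]) < threshold, else n
--     nxt = [n] * (n + 1)
--     for i in range(n - 1, -1, -1):
--         nxt[i] = i if abs(data_time[i]) < threshold else nxt[i + 1]
--     starts = [0]
--     ends = []
--     i = 0
--     while i < n:
--         if abs(data_time[i]) > threshold:
--             ends.append(i)
--             k = nxt[i]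
--             if k < n:
--                 starts.append(k)
--                 i = k
--         i += 1
--     ends.append(n)
--     return starts, ends
-- ===== Notes on version B (the rewrite author's own statement) =====
-- stated objective: alternative
-- what changed: Replaces A's inner forward rescan at every threshold crossing with a single backward suffix pass precomputing the next below-threshold index, then jumps to it directly (intended to avoid A's quadratic worst case; measured 1.3x on a timing run's inputs, so not claimed as faster).
import Mathlib
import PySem

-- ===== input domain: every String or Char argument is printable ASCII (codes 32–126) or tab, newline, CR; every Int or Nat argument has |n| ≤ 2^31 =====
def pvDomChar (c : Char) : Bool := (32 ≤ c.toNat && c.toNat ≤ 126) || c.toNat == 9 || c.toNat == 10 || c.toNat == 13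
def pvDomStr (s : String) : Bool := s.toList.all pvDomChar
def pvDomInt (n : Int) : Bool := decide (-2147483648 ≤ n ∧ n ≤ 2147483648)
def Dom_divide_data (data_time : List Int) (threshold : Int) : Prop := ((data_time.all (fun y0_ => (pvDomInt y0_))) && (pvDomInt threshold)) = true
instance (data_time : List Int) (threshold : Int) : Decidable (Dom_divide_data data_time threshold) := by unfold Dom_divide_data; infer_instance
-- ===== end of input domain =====

-- B replaces A's inner forward rescan at each threshold crossing by a single backward
-- suffix pass precomputing the next below-threshold index, then jumps to it (objective: alternative algorithm).

-- ===== PORT A =====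
-- A's inner for-loop: first j in range(0, len(data)-i) with abs(data[i+j]) < threshold
def findJ (data : List Int) (t : Int) (i j : Nat) : Option Nat :=
  if _h : i + j < data.length then
    if |data.getD (i + j) 0| < t then some j else findJ data t i (j + 1)
  else none
termination_by data.length - (i + j)
decreasing_by omega

-- A's while-loop; base case carries the final ends.append(len(data_time))
def loopA (data : List Int) (t : Int) (i : Nat) : List Int × List Int :=
  if _h : i < data.length then
    if |data.getD i 0| > t then
      match findJ data t i 0 with
      | some j =>
          let r := loopA data t (i + j + 1)
          (((i + j : Nat) : Int) :: r.1, (i : Int) :: r.2)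
      | none =>
          let r := loopA data t (i + 1)
          (r.1, (i : Int) :: r.2)
    else loopA data t (i + 1)
  else ([], [(data.length : Int)])
termination_by data.length - i
decreasing_by all_goals omega

def divide_data (data_time : List Int) (threshold : Int) : List Int × List Int :=
  let r := loopA data_time threshold 0
  ((0 : Int) :: r.1, r.2)

-- ===== PORT B =====
-- B's backward pass: the suffix nxt[i..n] of the nxt array (nxt[i] = first k ≥ i with |data[k]| < t, else n)
def nxtSuffix (data : List Int) (t : Int) (i : Nat) : List Nat :=
  if _h : i < data.length then
    let rest := nxtSuffix data t (i + 1)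
    (if |data.getD i 0| < t then i else rest.headD data.length) :: rest
  else [data.length]
termination_by data.length - i
decreasing_by omega

def buildNxt (data : List Int) (t : Int) : List Nat := nxtSuffix data t 0

-- value of nxt at index i (head of the suffix); used by the proofs and by loopB's termination
def nxtAt (data : List Int) (t : Int) (i : Nat) : Nat := (nxtSuffix data t i).headD data.length

theorem buildNxt_getD (data : List Int) (t : Int) (i : Nat) :
    (buildNxt data t).getD i data.length = nxtAt data t i := by
  suffices h : ∀ m j k, data.length - j ≤ m →
      (nxtSuffix data t j).getD k data.length = nxtAt data t (j + k) by
    simpa [buildNxt] using h data.length 0 i (by omega)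
  intro m
  induction m with
  | zero =>
      intro j k hj
      rw [nxtSuffix]
      have hjn : ¬ j < data.length := by omega
      simp only [hjn, dif_neg, not_false_iff]
      match k with
      | 0 => simp [nxtAt, nxtSuffix, hjn]
      | Nat.succ k' =>
          have : ¬ j + (k' + 1) < data.length := by omega
          simp [List.getD, nxtAt, nxtSuffix, this]
  | succ m ih =>
      intro j k hj
      by_cases hjn : j < data.length
      · match k with
        | 0 =>
            cases hns : nxtSuffix data t j with
            | nil => simp [nxtAt, hns, List.getD]
            | cons x xs => simp [nxtAt, hns, List.getD]
        | Nat.succ k' =>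
            rw [nxtSuffix]
            simp only [hjn, dif_pos]
            have := ih (j + 1) k' (by omega)
            simpa [List.getD, Nat.add_assoc, Nat.add_comm, Nat.add_left_comm] using this
      · rw [nxtSuffix]
        simp only [hjn, dif_neg, not_false_iff]
        match k with
        | 0 => simp [nxtAt, nxtSuffix, hjn]
        | Nat.succ k' =>
            have : ¬ j + (k' + 1) < data.length := by omega
            simp [List.getD, nxtAt, nxtSuffix, this]

theorem nxtAt_ge (data : List Int) (t : Int) (i : Nat) (h : i ≤ data.length) :
    i ≤ nxtAt data t i := by
  unfold nxtAt
  rw [nxtSuffix]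
  by_cases hi : i < data.length
  · simp only [hi, dif_pos, List.headD_cons]
    split
    · exact le_refl i
    · have := nxtAt_ge data t (i + 1) (by omega)
      unfold nxtAt at this
      omega
  · simp [hi]; omega
termination_by data.length - i
decreasing_by omega

-- B's while-loop with the precomputed jump table; base case carries the final ends.append(n)
def loopB (data : List Int) (t : Int) (i : Nat) : List Int × List Int :=
  if _h : i < data.length then
    if |data.getD i 0| > t then
      if _hk : (buildNxt data t).getD i data.length < data.length then
        let r := loopB data t ((buildNxt data t).getD i data.length + 1)
        ((((buildNxt data t).getD i data.length : Nat) : Int) :: r.1, (i : Int) :: r.2)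
      else
        let r := loopB data t (i + 1)
        (r.1, (i : Int) :: r.2)
    else loopB data t (i + 1)
  else ([], [(data.length : Int)])
termination_by data.length - i
decreasing_by
  · have h1 := buildNxt_getD data t i
    have h2 := nxtAt_ge data t i (by omega)
    omega
  all_goals omega

def divide_data_alt (data_time : List Int) (threshold : Int) : List Int × List Int :=
  let r := loopB data_time threshold 0
  ((0 : Int) :: r.1, r.2)

-- ===== PRECONDITION & SPEC =====
def Spec_divide_data (data_time : List Int) (threshold : Int) (out : List Int × List Int) : Prop := out = divide_data_alt data_time threshold
instance (data_time : List Int) (threshold : Int) (out : List Int × List Int) : Decidable (Spec_divide_data data_time threshold out) := by unfold Spec_divide_data; infer_instance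

-- ===== CLAIM (what is proved, stated in full; the proofs are below) =====
def Claim_equal_divide_data : Prop := ∀ (data_time : List Int) (threshold : Int), Dom_divide_data data_time threshold → Spec_divide_data data_time threshold (divide_data data_time threshold)

-- ===== LEMMAS AND PROOFS =====

-- unfolding characterisation of nxtAt
theorem nxtAt_unfold (data : List Int) (t : Int) (i : Nat) :
    nxtAt data t i =
      if i < data.length then
        (if |data.getD i 0| < t then i else nxtAt data t (i + 1))
      else data.length := by
  conv_lhs => unfold nxtAt; rw [nxtSuffix]
  by_cases hi : i < data.length
  · simp [hi, nxtAt]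
  · simp [hi]

-- A's inner scan finds exactly the nxt entry
theorem findJ_eq (data : List Int) (t : Int) (i j : Nat) :
    findJ data t i j =
      (if nxtAt data t (i + j) < data.length then some (nxtAt data t (i + j) - i) else none) := by
  rw [findJ, nxtAt_unfold]
  by_cases hij : i + j < data.length
  · simp only [hij, dif_pos, if_pos]
    by_cases hlt : |data.getD (i + j) 0| < t
    · have hred : (if |data.getD (i + j) 0| < t then i + j else nxtAt data t (i + j + 1)) = i + j :=
        if_pos hlt
      rw [if_pos hlt, hred, if_pos hij]
      exact congrArg some (by omega)
    · simp only [hlt, if_neg, not_false_iff]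
      have := findJ_eq data t i (j + 1)
      rw [this]
      have : i + (j + 1) = i + j + 1 := by omega
      rw [this]
  · have h2 : ¬ data.length < data.length := by omega
    simp [hij]
termination_by data.length - (i + j)
decreasing_by omega

theorem loop_eq (data : List Int) (t : Int) (i : Nat) :
    loopA data t i = loopB data t i := by
  rw [loopA, loopB]
  by_cases h : i < data.length
  · simp only [h, dif_pos]
    by_cases hgt : |data.getD i 0| > t
    · simp only [hgt, if_pos]
      have hf : findJ data t i 0 =
          (if nxtAt data t i < data.length then some (nxtAt data t i - i) else none) := by
        simpa using findJ_eq data t i 0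
      have hb := buildNxt_getD data t i
      have hge := nxtAt_ge data t i (by omega)
      by_cases hk : nxtAt data t i < data.length
      · rw [hf, if_pos hk]
        have hk' : (buildNxt data t).getD i data.length < data.length := by omega
        simp only [hk']
        have hi1 : i + (nxtAt data t i - i) + 1 = (buildNxt data t).getD i data.length + 1 := by
          omega
        have hi2 : i + (nxtAt data t i - i) = (buildNxt data t).getD i data.length := by omega
        rw [loop_eq data t (i + (nxtAt data t i - i) + 1)] at *
        simp [hi2]
      · rw [hf, if_neg hk]
        have hk' : ¬ (buildNxt data t).getD i data.length < data.length := by omega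
        simp only [hk']
        simp [loop_eq data t (i + 1)]
    · simp only [hgt, if_neg, not_false_iff]
      exact loop_eq data t (i + 1)
  · simp [h]
termination_by data.length - i
decreasing_by all_goals omega

-- ===== VERDICT (by name: the statement is the Claim_ definition above) =====
theorem divide_data_spec : Claim_equal_divide_data := by
  intro data t _
  unfold Spec_divide_data divide_data divide_data_alt
  rw [loop_eq]
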